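-- pv_equiv track=rewrite | github.com/posl/comment_recommendation | script/split_gen/2_time/zh/113_D/2.py | amidakuji
-- ===== SOURCE A (Python) =====
-- def amidakuji(h,w,k):
--     if h == 1:
--         if k == 1:
--             return 1
--         elif k == w:
--             return 2
--         else:
--             return 0
--     else:
--         if k == 1:
--             return amidakuji(h-1,w,k)
--         elif k == w:
--             return amidakuji(h-1,w-1,k-1)
--         else:
--             return amidakuji(h-1,w,k) + amidakuji(h-1,w-1,k-1)
-- ===== SOURCE B (Python) =====
-- from math import comb
--
-- def amidakuji(h, w, k):
--     if k == w:
--         return 1 if 1 <= k <= h else 2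
--     return comb(h - 1, k - 1) if 1 <= k <= h else 0
-- ===== Notes on version B (the rewrite author's own statement) =====
-- stated objective: faster
-- what changed: Replaced the exponential branching recursion by a closed-form answer: binomial coefficient C(h-1,k-1) when k != w (clamped to 0 outside 1<=k<=h), and 1 or 2 in the k==w column depending on whether h >= k.
import Mathlib
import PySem

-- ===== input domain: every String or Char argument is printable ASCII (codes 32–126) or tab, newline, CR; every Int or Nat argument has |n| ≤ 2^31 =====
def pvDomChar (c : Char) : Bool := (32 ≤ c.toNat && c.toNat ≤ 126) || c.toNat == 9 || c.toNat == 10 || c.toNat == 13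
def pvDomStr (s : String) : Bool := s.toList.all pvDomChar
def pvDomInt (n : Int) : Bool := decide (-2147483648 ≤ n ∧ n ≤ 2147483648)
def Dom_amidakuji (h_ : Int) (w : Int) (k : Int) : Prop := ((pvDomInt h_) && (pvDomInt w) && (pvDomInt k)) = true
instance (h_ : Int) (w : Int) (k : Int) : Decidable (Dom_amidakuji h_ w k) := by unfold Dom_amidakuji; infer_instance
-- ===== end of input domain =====

-- B replaces A's exponential branching recursion by a closed-form binomial-coefficient answer (faster, asymptotic).


-- ===== PORT A =====
-- Literal port of A. The 'h_ ≤ 1' guard (A writes 'h == 1') only makes the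
-- recursion total: for h_ ≤ 0 Python A recurses forever (RecursionError), and
-- those inputs are excluded by Pre_amidakuji.
def amidakuji (h_ : Int) (w : Int) (k : Int) : Int :=
  if h_ ≤ 1 then
    if k == 1 then 1
    else if k == w then 2
    else 0
  else
    if k == 1 then amidakuji (h_ - 1) w k
    else if k == w then amidakuji (h_ - 1) (w - 1) (k - 1)
    else amidakuji (h_ - 1) w k + amidakuji (h_ - 1) (w - 1) (k - 1)
termination_by h_.toNat
decreasing_by all_goals omega

-- ===== PORT B =====
-- Port of Source B: math.comb(h-1, k-1) is Nat.choose (only reached when 1 ≤ k ≤ h_).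
def amidakuji_alt (h_ : Int) (w : Int) (k : Int) : Int :=
  if k == w then
    if 1 ≤ k ∧ k ≤ h_ then 1 else 2
  else
    if 1 ≤ k ∧ k ≤ h_ then ((h_ - 1).toNat.choose (k - 1).toNat : Int) else 0

-- ===== PRECONDITION & SPEC =====
-- Pre_ excludes h_ ≤ 0, where Python A recurses forever (RecursionError).
def Pre_amidakuji (h_ : Int) (w : Int) (k : Int) : Prop := 1 ≤ h_
instance (h_ : Int) (w : Int) (k : Int) : Decidable (Pre_amidakuji h_ w k) := by unfold Pre_amidakuji; infer_instance
def pvWitness_amidakuji : Int × Int × Int := (3, 4, 2)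

def Spec_amidakuji (h_ : Int) (w : Int) (k : Int) (out : Int) : Prop := out = amidakuji_alt h_ w k
instance (h_ : Int) (w : Int) (k : Int) (out : Int) : Decidable (Spec_amidakuji h_ w k out) := by unfold Spec_amidakuji; infer_instance

-- ===== CLAIM (what is proved, stated in full; the proofs are below) =====
def Claim_equal_amidakuji : Prop := ∀ (h_ : Int) (w : Int) (k : Int), Dom_amidakuji h_ w k → Pre_amidakuji h_ w k → Spec_amidakuji h_ w k (amidakuji h_ w k)

-- ===== LEMMAS AND PROOFS =====

lemma amid_eq (h_ : Int) (hh : 1 ≤ h_) : ∀ (w k : Int), amidakuji h_ w k = amidakuji_alt h_ w k := by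
  induction h_, hh using Int.le_induction with
  | base =>
    intro w k
    rw [amidakuji]
    unfold amidakuji_alt
    simp only [beq_iff_eq, le_refl, if_true]
    by_cases h1 : k = 1 <;> by_cases h2 : k = w <;>
      simp only [h1, h2, if_true, if_false] <;> split_ifs <;> first | rfl | omega
  | succ n hn ih =>
    intro w k
    rw [amidakuji]
    have hng : ¬ (n + 1 ≤ (1:Int)) := by omega
    rw [if_neg hng]
    simp only [beq_iff_eq, add_sub_cancel_right]
    by_cases h1 : k = 1
    · subst h1
      rw [if_pos rfl, ih w 1]
      unfold amidakuji_alt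
      have c1 : (1:Int) ≤ 1 ∧ (1:Int) ≤ n := ⟨le_refl _, hn⟩
      have c2 : (1:Int) ≤ 1 ∧ (1:Int) ≤ n + 1 := ⟨le_refl _, by omega⟩
      simp only [beq_iff_eq, if_pos c1, if_pos c2,
        show ((1:Int) - 1).toNat = 0 by norm_num, Nat.choose_zero_right]
    · rw [if_neg h1]
      by_cases h2 : k = w
      · subst h2
        rw [if_pos rfl, ih (k - 1) (k - 1)]
        unfold amidakuji_alt
        simp only [beq_self_eq_true, if_pos]
        split_ifs <;> first | rfl | omega
      · rw [if_neg h2, ih w k, ih (w - 1) (k - 1)]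
        unfold amidakuji_alt
        have h2' : ¬ (k - 1 = w - 1) := by omega
        simp only [beq_iff_eq, h2, h2', if_false]
        by_cases hk0 : 1 ≤ k
        · by_cases hkn : k ≤ n
          · -- both summands live: Pascal's rule
            have hk1 : 1 ≤ k - 1 := by omega
            have e1 : (n + 1 - 1).toNat = (n - 1).toNat + 1 := by omega
            have e2 : (k - 1).toNat = (k - 1 - 1).toNat + 1 := by omega
            rw [if_pos (show 1 ≤ k ∧ k ≤ n from ⟨hk0, hkn⟩),
              if_pos (show 1 ≤ k - 1 ∧ k - 1 ≤ n from ⟨hk1, by omega⟩),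
              if_pos (show 1 ≤ k ∧ k ≤ n + 1 from ⟨hk0, by omega⟩),
              e1, e2, Nat.choose_succ_succ']
            push_cast
            ring
          · by_cases hkn1 : k ≤ n + 1
            · -- k = n + 1: only the shifted summand contributes, both sides are 1
              rw [if_neg (show ¬ (1 ≤ k ∧ k ≤ n) by omega),
                if_pos (show 1 ≤ k - 1 ∧ k - 1 ≤ n from ⟨by omega, by omega⟩),
                if_pos (show 1 ≤ k ∧ k ≤ n + 1 from ⟨hk0, hkn1⟩)]
              have e3 : (n + 1 - 1).toNat = (k - 1).toNat := by omega
              have e4 : (n - 1).toNat = (k - 1 - 1).toNat := by omega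
              rw [e3, e4, Nat.choose_self, Nat.choose_self]
              simp
            · rw [if_neg (show ¬ (1 ≤ k ∧ k ≤ n) by omega),
                if_neg (show ¬ (1 ≤ k - 1 ∧ k - 1 ≤ n) by omega),
                if_neg (show ¬ (1 ≤ k ∧ k ≤ n + 1) by omega)]
              simp
        · rw [if_neg (show ¬ (1 ≤ k ∧ k ≤ n) by omega),
            if_neg (show ¬ (1 ≤ k - 1 ∧ k - 1 ≤ n) by omega),
            if_neg (show ¬ (1 ≤ k ∧ k ≤ n + 1) by omega)]
          simp

-- ===== VERDICT (by name: the statement is the Claim_ definition above) =====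
theorem amidakuji_spec : Claim_equal_amidakuji := by
  intro h_ w k _ hpre
  unfold Spec_amidakuji
  exact amid_eq h_ hpre w k
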